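-- pv_equiv track=rewrite | github.com/openeduhub/oeh-search-etl | schulcloud/adhoc_tasks/h5p/h5p_upload.py | get_permitted_groups
-- ===== SOURCE A (Python) =====
-- from typing import Optional, List, IO, Callable, Dict
--
-- def get_permitted_groups(permissions: List[str]):
--     permitted_groups = []
--     for permission in permissions:
--         if permission == "ALLE":
--             permitted_groups = ['Thuringia-public', 'Brandenburg-public', 'LowerSaxony-public']
--         elif permission == "THR":
--             permitted_groups.append("Thuringia-public")
--         elif permission == "NDS":
--             permitted_groups.append("LowerSaxony-public")
--         elif permission == "BRB":
--             permitted_groups.append("Brandenburg-public")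
--     return permitted_groups
-- ===== SOURCE B (Python) =====
-- GROUP_MAP = {"THR": "Thuringia-public", "NDS": "LowerSaxony-public", "BRB": "Brandenburg-public"}
--
-- def get_permitted_groups(permissions):
--     try:
--         pivot = len(permissions) - 1 - permissions[::-1].index("ALLE")
--         base = ['Thuringia-public', 'Brandenburg-public', 'LowerSaxony-public']
--         tail = permissions[pivot + 1:]
--     except ValueError:
--         base = []
--         tail = permissions
--     return base + [GROUP_MAP[p] for p in tail if p in GROUP_MAP]
-- ===== Notes on version B (the rewrite author's own statement) =====
-- stated objective: alternative
-- what changed: Replaces the reset-inside-loop accumulator with a pivot decomposition: locate the last 'ALLE' (via a reversed index search), take the fixed base list if found, and map only the suffix after it through a code->group dict comprehension.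
import Mathlib
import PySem

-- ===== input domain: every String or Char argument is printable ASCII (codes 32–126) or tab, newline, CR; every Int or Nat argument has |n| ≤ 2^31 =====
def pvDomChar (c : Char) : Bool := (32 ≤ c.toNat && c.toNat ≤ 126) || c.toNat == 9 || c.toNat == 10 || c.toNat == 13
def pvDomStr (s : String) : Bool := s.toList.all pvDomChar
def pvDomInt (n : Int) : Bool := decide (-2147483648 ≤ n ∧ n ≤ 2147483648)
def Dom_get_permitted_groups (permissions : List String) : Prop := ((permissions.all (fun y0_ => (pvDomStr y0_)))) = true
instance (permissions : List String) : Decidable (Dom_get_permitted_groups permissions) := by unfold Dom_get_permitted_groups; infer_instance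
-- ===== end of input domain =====

-- B replaces A's reset-inside-loop accumulator by a pivot decomposition (find the last 'ALLE'
-- via a reversed index search, then map only the suffix); alternative, not faster.

-- ===== PORT A =====
def pvStepA (acc : List String) (permission : String) : List String :=
  if permission = "ALLE" then ["Thuringia-public", "Brandenburg-public", "LowerSaxony-public"]
  else if permission = "THR" then acc ++ ["Thuringia-public"]
  else if permission = "NDS" then acc ++ ["LowerSaxony-public"]
  else if permission = "BRB" then acc ++ ["Brandenburg-public"]
  else acc

def get_permitted_groups (permissions : List String) : List String :=
  permissions.foldl pvStepA []

-- ===== PORT B =====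
-- GROUP_MAP lookup / membership test from Source B
def pvGroupMap? (p : String) : Option String :=
  if p = "THR" then some "Thuringia-public"
  else if p = "NDS" then some "LowerSaxony-public"
  else if p = "BRB" then some "Brandenburg-public"
  else none

def get_permitted_groups_alt (permissions : List String) : List String :=
  match PySem.List.index? permissions.reverse "ALLE" with
  | some i =>
      -- pivot = len - 1 - i; tail = permissions[pivot+1:] = drop (len - i)
      ["Thuringia-public", "Brandenburg-public", "LowerSaxony-public"]
        ++ (permissions.drop (permissions.length - i)).filterMap pvGroupMap?
  | none => permissions.filterMap pvGroupMap?

-- ===== PRECONDITION & SPEC =====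
def Spec_get_permitted_groups (permissions : List String) (out : List String) : Prop := out = get_permitted_groups_alt permissions
instance (permissions : List String) (out : List String) : Decidable (Spec_get_permitted_groups permissions out) := by unfold Spec_get_permitted_groups; infer_instance

-- ===== CLAIM (what is proved, stated in full; the proofs are below) =====
def Claim_equal_get_permitted_groups : Prop := ∀ (permissions : List String), Dom_get_permitted_groups permissions → Spec_get_permitted_groups permissions (get_permitted_groups permissions)

-- ===== LEMMAS AND PROOFS =====
lemma alt_append_singleton (l : List String) (x : String) :
    get_permitted_groups_alt (l ++ [x]) = pvStepA (get_permitted_groups_alt l) x := by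
  by_cases hx : x = "ALLE"
  · subst hx
    unfold get_permitted_groups_alt
    rw [show (l ++ ["ALLE"]).reverse = "ALLE" :: l.reverse from by simp,
        PySem.List.index?_cons_self]
    simp [pvStepA]
  · have hrev : (l ++ [x]).reverse = x :: l.reverse := by simp
    have hidx : PySem.List.index? ((l ++ [x]).reverse) "ALLE"
        = (PySem.List.index? l.reverse "ALLE").map (· + 1) := by
      rw [hrev, PySem.List.index?_cons_of_ne l.reverse hx]
    unfold get_permitted_groups_alt
    rw [hidx]
    cases h : PySem.List.index? l.reverse "ALLE" with
    | none =>
        simp only [Option.map_none]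
        simp [pvStepA, hx, pvGroupMap?, List.filterMap_append]
        split_ifs <;> simp_all
    | some i =>
        have hi : i < l.length := by
          obtain ⟨hk, -⟩ := PySem.List.getElem_of_index?_eq_some h
          simpa using hk
        simp only [Option.map_some]
        have hlen : l.length + 1 - (i + 1) = l.length - i := by omega
        have hdrop : (l ++ [x]).drop (l.length - i) = l.drop (l.length - i) ++ [x] := by
          rw [List.drop_append_of_le_length (by omega)]
        simp only [List.length_append, List.length_cons, List.length_nil, hlen]
        rw [hdrop]
        simp [pvStepA, hx, pvGroupMap?, List.filterMap_append]
        split_ifs <;> simp_all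

-- ===== VERDICT (by name: the statement is the Claim_ definition above) =====
theorem get_permitted_groups_spec : Claim_equal_get_permitted_groups := by
  intro permissions hdom
  clear hdom
  unfold Spec_get_permitted_groups get_permitted_groups
  induction permissions using List.reverseRecOn with
  | nil => decide
  | append_singleton l x ih =>
      rw [alt_append_singleton, List.foldl_append, List.foldl_cons, List.foldl_nil, ih]
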